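-- pv_equiv track=rewrite | github.com/vzsky/13-lonely-runners | resolver.py | check_seed
-- ===== SOURCE A (Python) =====
-- def check_seed(seed, p, k):
--     target = set(range(1, k + 1))
--     for a in range(1, p):
--         image = set((a * s) % p for s in seed)
--         if len(image) != k:
--             continue
--         abs_image = set(min(x, p - x) for x in image)
--         if abs_image == target:
--             signs = {min(x, p-x): ('+' if x <= p//2 else '-') for x in image}
--             return True, a, signs
--     return False, None, {}
-- ===== SOURCE B (Python) =====
-- # B: instead of scanning every multiplier a in [1, p), solve a*seed[0] == +-j (mod p) for
-- # j = 1..min(k, p//2) with an extended-gcd Bezout coefficient and test only those candidates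
-- # in increasing order; validity is decided by a single early-exit pass over the seed.
-- def _signs(a, seed, p, k):
--     # one pass: map each absolute residue j to its residue x and sign; fail fast on an
--     # out-of-range j, on two residues sharing one j, or on fewer than k distinct j's
--     m = {}
--     for s in seed:
--         x = (a * s) % p
--         j = min(x, p - x)
--         if j < 1 or j > k:
--             return None
--         if j in m:
--             if m[j][0] != x:
--                 return None
--         else:
--             m[j] = (x, '+' if x <= p // 2 else '-')
--     if len(m) != k:
--         return None
--     return {j: sg for j, (x, sg) in m.items()}
--
--
-- def _bezout(r, p):
--     # returns (g, s) with g = gcd(r, p) and s*r == g (mod p)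
--     old_r, rr = r, p
--     old_s, s = 1, 0
--     while rr:
--         q = old_r // rr
--         old_r, rr = rr, old_r - q * rr
--         old_s, s = s, old_s - q * s
--     return old_r, old_s
--
--
-- def check_seed(seed, p, k):
--     if p <= 1:
--         return False, None, {}
--     if not seed:
--         if k == 0:
--             return True, 1, {}
--         return False, None, {}
--     r = seed[0] % p
--     cands = set()
--     if r:
--         g, s = _bezout(r, p)
--         pp = p // g
--         u = s % pp
--         for j in range(1, min(k, p // 2) + 1):
--             for t in (j, p - j):
--                 if t % g == 0:
--                     base = (t // g) * u % pp
--                     for m in range(g):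
--                         cands.add(base + m * pp)
--     for a in sorted(cands):
--         signs = _signs(a, seed, p, k)
--         if signs is not None:
--             return True, a, signs
--     return False, None, {}
-- ===== Notes on version B (the rewrite author's own statement) =====
-- stated objective: faster
-- what changed: Instead of scanning every multiplier a in [1, p) and building sets for each, B solves a*seed[0] ≡ ±j (mod p) for j = 1..min(k, p//2) with one extended-gcd Bezout coefficient and tests only those O(k*gcd-class) candidates in increasing order, keeping A's per-candidate validity check.
import Mathlib
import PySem

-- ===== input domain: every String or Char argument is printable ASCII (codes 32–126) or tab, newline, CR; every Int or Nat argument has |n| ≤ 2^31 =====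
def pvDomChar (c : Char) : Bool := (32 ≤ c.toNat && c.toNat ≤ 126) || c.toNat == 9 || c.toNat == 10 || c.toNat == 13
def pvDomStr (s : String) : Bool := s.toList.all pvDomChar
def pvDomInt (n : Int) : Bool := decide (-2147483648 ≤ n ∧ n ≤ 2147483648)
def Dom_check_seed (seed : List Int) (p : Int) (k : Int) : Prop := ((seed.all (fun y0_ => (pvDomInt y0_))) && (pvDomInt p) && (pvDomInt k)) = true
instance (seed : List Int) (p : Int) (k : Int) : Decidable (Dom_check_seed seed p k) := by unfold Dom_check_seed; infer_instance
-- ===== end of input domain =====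

-- B replaces A's scan of every multiplier a in [1, p) by solving a*seed[0] ≡ ±j (mod p) with an
-- extended-gcd Bezout coefficient, testing only those O(k) candidates in increasing order (faster).
-- B also replaces A's three set comprehensions per candidate by one early-exit pass over the seed.

-- ===== PORT A =====
-- inner check of A's loop body: sets built from the seed, compared with target = set(range(1, k+1));
-- returns the signs dict (as its items list) when a is a valid multiplier, none otherwise
def pvAttempt (a : Int) (seed : List Int) (p : Int) (k : Int) : Option (List (Int × String)) :=
  let image : PySem.Set Int := PySem.Set.ofList (seed.map (fun s => PySem.Int.mod (a * s) p))
  if ((PySem.Set.len image : Int) ≠ k) then none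
  else
    let absImage : PySem.Set Int := PySem.Set.ofList (image.map (fun x => min x (p - x)))
    if PySem.Set.equal absImage (PySem.Set.ofList (PySem.List.pyRange 1 (k + 1) 1)) then
      some ((image.foldl (fun d x => d.insert (min x (p - x)) (if x ≤ PySem.Int.floordiv p 2 then "+" else "-")) (PySem.Dict.empty : PySem.Dict Int String)).items)
    else none

-- A's 'for a in range(1, p): if valid: return True, a, signs' loop
def pvScan (seed : List Int) (p : Int) (k : Int) : List Int → Bool × Option Int × (List (Int × String))
  | [] => (false, none, [])
  | a :: rest =>
    match pvAttempt a seed p k with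
    | some signs => (true, some a, signs)
    | none => pvScan seed p k rest

def check_seed (seed : List Int) (p : Int) (k : Int) : Bool × Option Int × (List (Int × String)) :=
  pvScan seed p k (PySem.List.pyRange 1 p 1)

-- ===== PORT B =====
-- termination facts for the Euclidean loop in pvBezout (cited by its decreasing_by)
theorem pvMod_natAbs_lt (a b : Int) (hb : b ≠ 0) : (PySem.Int.mod a b).natAbs < b.natAbs := by
  rcases lt_or_gt_of_ne hb with h | h
  · have := PySem.Int.mod_neg_bounds a h
    omega
  · have h1 := PySem.Int.mod_nonneg a h
    have h2 := PySem.Int.mod_lt a h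
    omega

theorem pvBezout_step (a b : Int) : a - PySem.Int.floordiv a b * b = PySem.Int.mod a b := by
  have := PySem.Int.floordiv_mul_add_mod a b
  omega

-- Source B's _bezout: extended Euclid, returns (g, s) with g = gcd(r, p) and s*r ≡ g (mod p)
def pvBezout (oldr : Int) (rr : Int) (olds : Int) (s : Int) : Int × Int :=
  if rr = 0 then (oldr, olds)
  else
    pvBezout rr (oldr - PySem.Int.floordiv oldr rr * rr) s (olds - PySem.Int.floordiv oldr rr * s)
termination_by rr.natAbs
decreasing_by
  rw [pvBezout_step]
  exact pvMod_natAbs_lt oldr rr (by assumption)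

def pvSignsLoop (a : Int) (p : Int) (k : Int) : List Int → PySem.Dict Int (Int × String) → Option (PySem.Dict Int (Int × String))
  | [], m => some m
  | s :: rest, m =>
    let x := PySem.Int.mod (a * s) p
    let j := min x (p - x)
    if j < 1 ∨ k < j then none
    else
      match m.get? j with
      | some xv => if xv.1 ≠ x then none else pvSignsLoop a p k rest m
      | none => pvSignsLoop a p k rest (m.insert j (x, if x ≤ PySem.Int.floordiv p 2 then "+" else "-"))

-- Source B's _signs: one early-exit pass over the seed building j -> (x, sign), then the length test
def pvSignsB (a : Int) (seed : List Int) (p : Int) (k : Int) : Option (List (Int × String)) :=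
  match pvSignsLoop a p k seed PySem.Dict.empty with
  | none => none
  | some m =>
    if ((m.size : Int) ≠ k) then none
    else some ((m.items.foldl (fun d pr => d.insert pr.1 pr.2.2) (PySem.Dict.empty : PySem.Dict Int String)).items)

-- Source B's candidate loop: 'for a in sorted(cands): if _signs(...) is not None: return ...'
def pvScanB (seed : List Int) (p : Int) (k : Int) : List Int → Bool × Option Int × (List (Int × String))
  | [] => (false, none, [])
  | a :: rest =>
    match pvSignsB a seed p k with
    | some signs => (true, some a, signs)
    | none => pvScanB seed p k rest

def check_seed_alt (seed : List Int) (p : Int) (k : Int) : Bool × Option Int × (List (Int × String)) :=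
  if p ≤ 1 then (false, none, [])
  else
    match seed with
    | [] => if k = 0 then (true, some 1, []) else (false, none, [])
    | s0 :: _ =>
      let r := PySem.Int.mod s0 p
      let cands : PySem.Set Int :=
        if r ≠ 0 then
          let bz := pvBezout r p 1 0
          let pp := PySem.Int.floordiv p bz.1
          let u := PySem.Int.mod bz.2 pp
          (PySem.List.pyRange 1 (min k (PySem.Int.floordiv p 2) + 1) 1).foldl
            (fun c j =>
              [j, p - j].foldl
                (fun c t =>
                  if PySem.Int.mod t bz.1 = 0 then
                    let base := PySem.Int.mod (PySem.Int.floordiv t bz.1 * u) pp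
                    (PySem.List.pyRange 0 bz.1 1).foldl
                      (fun c m => PySem.Set.add c (base + m * pp)) c
                  else c) c) PySem.Set.empty
        else PySem.Set.empty
      pvScanB seed p k (PySem.List.sorted cands (fun x => x) false)

-- ===== PRECONDITION & SPEC =====
def Spec_check_seed (seed : List Int) (p : Int) (k : Int) (out : Bool × Option Int × (List (Int × String))) : Prop := out = check_seed_alt seed p k
instance (seed : List Int) (p : Int) (k : Int) (out : Bool × Option Int × (List (Int × String))) : Decidable (Spec_check_seed seed p k out) := by unfold Spec_check_seed; infer_instance

-- ===== CLAIM (what is proved, stated in full; the proofs are below) =====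
def Claim_equal_check_seed : Prop := ∀ (seed : List Int) (p : Int) (k : Int), Dom_check_seed seed p k → Spec_check_seed seed p k (check_seed seed p k)

-- ===== LEMMAS AND PROOFS =====

-- abbreviations used only in the proofs
def pvXf (a p s : Int) : Int := PySem.Int.mod (a * s) p
def pvJf (p x : Int) : Int := min x (p - x)
def pvEnt (p x : Int) : Int × (Int × String) :=
  (min x (p - x), (x, if x ≤ PySem.Int.floordiv p 2 then "+" else "-"))

theorem pvOfList_sublist (l : List Int) : (PySem.Set.ofList l).Sublist l := by
  induction l with
  | nil => simp [PySem.Set.ofList]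
  | cons x xs ih =>
    rw [PySem.Set.ofList_cons]
    refine List.Sublist.cons₂ x ?_
    exact List.Sublist.trans (by unfold PySem.Set.discard; exact List.filter_sublist) ih

theorem pvNodup_of_ofList_length (l : List Int)
    (h : (PySem.Set.ofList l).length = l.length) : l.Nodup := by
  have := (pvOfList_sublist l).eq_of_length h
  rw [← this]
  exact PySem.Set.nodup_ofList l

-- the one-pass loop of B's _signs: failure iff a residue out of range or two residues sharing
-- an absolute value; on success the dict lists (j, (x, sign)) over the distinct residues in order
theorem pvSignsLoop_spec (a p k : Int) : ∀ (l : List Int) (S : PySem.Set Int)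
    (m : PySem.Dict Int (Int × String)),
    S.Nodup →
    m.items = S.map (pvEnt p) →
    (∀ x ∈ S, 1 ≤ pvJf p x ∧ pvJf p x ≤ k) →
    ((S.map (pvJf p)).Nodup) →
    ((pvSignsLoop a p k l m = none ↔
        ¬ ((∀ s ∈ l, 1 ≤ pvJf p (pvXf a p s) ∧ pvJf p (pvXf a p s) ≤ k) ∧
           ((S.update (l.map (pvXf a p))).map (pvJf p)).Nodup)) ∧
      (∀ m', pvSignsLoop a p k l m = some m' →
        m'.items = (S.update (l.map (pvXf a p))).map (pvEnt p))) := by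
  intro l
  induction l with
  | nil =>
    intro S m hS hitems hbnd hinj
    constructor
    · simp [pvSignsLoop, PySem.Set.update_nil, hinj]
    · intro m' hm'
      simp only [pvSignsLoop, Option.some.injEq] at hm'
      rw [← hm', List.map_nil, PySem.Set.update_nil, hitems]
  | cons s rest ih =>
    intro S m hS hitems hbnd hinj
    have hkeys : m.keys = S.map (pvJf p) := by
      show m.items.map Prod.fst = _
      rw [hitems, List.map_map]
      rfl
    have hkeysnd : m.keys.Nodup := by rw [hkeys]; exact hinj
    have hxf : pvXf a p s = PySem.Int.mod (a * s) p := rfl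
    have hjf : pvJf p (PySem.Int.mod (a * s) p) =
        min (PySem.Int.mod (a * s) p) (p - PySem.Int.mod (a * s) p) := rfl
    by_cases hb : min (PySem.Int.mod (a * s) p) (p - PySem.Int.mod (a * s) p) < 1 ∨
        k < min (PySem.Int.mod (a * s) p) (p - PySem.Int.mod (a * s) p)
    · have heq : pvSignsLoop a p k (s :: rest) m = none := by
        simp only [pvSignsLoop]
        rw [if_pos hb]
      rw [heq]
      constructor
      · simp only [true_iff]
        intro ⟨hall, _⟩
        have := hall s List.mem_cons_self
        rw [hxf, hjf] at this
        omega
      · intro m' hm'; exact absurd hm' (by simp)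
    · cases hget : m.get? (min (PySem.Int.mod (a * s) p) (p - PySem.Int.mod (a * s) p)) with
      | some xv =>
        obtain ⟨x0, hx0S, hx0e⟩ : ∃ x0 ∈ S, pvEnt p x0 =
            (min (PySem.Int.mod (a * s) p) (p - PySem.Int.mod (a * s) p), xv) := by
          have := (PySem.Dict.get?_eq_some_iff_mem_items m _ xv hkeysnd).mp hget
          rw [hitems] at this
          obtain ⟨x0, hx0, he⟩ := List.mem_map.mp this
          exact ⟨x0, hx0, he⟩
        have hjx0 : pvJf p x0 = min (PySem.Int.mod (a * s) p) (p - PySem.Int.mod (a * s) p) := by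
          simpa [pvEnt, pvJf] using congrArg Prod.fst hx0e
        have hxv1 : x0 = xv.1 := by
          simpa [pvEnt] using congrArg (fun q => q.2.1) hx0e
        by_cases hx : xv.1 ≠ PySem.Int.mod (a * s) p
        · have heq : pvSignsLoop a p k (s :: rest) m = none := by
            simp only [pvSignsLoop, hget]
            rw [if_neg hb, if_pos hx]
          rw [heq]
          constructor
          · simp only [true_iff]
            rintro ⟨hall, hnd⟩
            have hx0ne : x0 ≠ PySem.Int.mod (a * s) p := by rw [hxv1]; exact hx
            have hxmem : PySem.Int.mod (a * s) p ∈ S.update ((s :: rest).map (pvXf a p)) := by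
              rw [PySem.Set.mem_update]
              exact Or.inr (List.mem_map.mpr ⟨s, List.mem_cons_self, hxf⟩)
            have hx0mem : x0 ∈ S.update ((s :: rest).map (pvXf a p)) := by
              rw [PySem.Set.mem_update]; exact Or.inl hx0S
            have hji : pvJf p x0 = pvJf p (PySem.Int.mod (a * s) p) := by rw [hjx0, hjf]
            exact hx0ne (List.inj_on_of_nodup_map hnd hx0mem hxmem hji)
          · intro m' hm'; exact absurd hm' (by simp)
        · have hx' : xv.1 = PySem.Int.mod (a * s) p := by
            by_contra hc; exact hx hc
          have heq : pvSignsLoop a p k (s :: rest) m = pvSignsLoop a p k rest m := by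
            simp only [pvSignsLoop, hget]
            rw [if_neg hb, if_neg hx]
          have hxS : PySem.Int.mod (a * s) p ∈ S := by
            have : x0 = PySem.Int.mod (a * s) p := hxv1.trans hx'
            rw [← this]; exact hx0S
          have hupd : S.update ((s :: rest).map (pvXf a p)) = S.update (rest.map (pvXf a p)) := by
            rw [List.map_cons, PySem.Set.update_cons, hxf, PySem.Set.add_of_mem hxS]
          obtain ⟨ih1, ih2⟩ := ih S m hS hitems hbnd hinj
          rw [heq, hupd]
          constructor
          · rw [ih1]
            constructor
            · intro hn ⟨hall, hnd⟩
              exact hn ⟨fun t ht => hall t (List.mem_cons_of_mem s ht), hnd⟩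
            · intro hn ⟨hall, hnd⟩
              refine hn ⟨?_, hnd⟩
              intro t ht
              rcases List.mem_cons.mp ht with rfl | ht'
              · rw [hxf, hjf]; omega
              · exact hall t ht'
          · exact ih2
      | none =>
        have hcont : m.contains (min (PySem.Int.mod (a * s) p) (p - PySem.Int.mod (a * s) p))
            = false := (PySem.Dict.get?_eq_none_iff_contains m _).mp hget
        have hnotin : ∀ x0 ∈ S, pvJf p x0 ≠
            min (PySem.Int.mod (a * s) p) (p - PySem.Int.mod (a * s) p) := by
          intro x0 hx0 hj0
          have hmemk : min (PySem.Int.mod (a * s) p) (p - PySem.Int.mod (a * s) p) ∈ m.keys := by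
            rw [hkeys]; exact List.mem_map.mpr ⟨x0, hx0, hj0⟩
          rw [← PySem.Dict.contains_iff_mem_keys, hcont] at hmemk
          exact absurd hmemk (by simp)
        have hxS : PySem.Int.mod (a * s) p ∉ S := fun hxS => hnotin _ hxS hjf
        have heq : pvSignsLoop a p k (s :: rest) m = pvSignsLoop a p k rest
            (m.insert (min (PySem.Int.mod (a * s) p) (p - PySem.Int.mod (a * s) p))
              (PySem.Int.mod (a * s) p,
                if PySem.Int.mod (a * s) p ≤ PySem.Int.floordiv p 2 then "+" else "-")) := by
          simp only [pvSignsLoop, hget]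
          rw [if_neg hb]
        have hS' : (S ++ [PySem.Int.mod (a * s) p]).Nodup := by
          rw [List.nodup_append]
          refine ⟨hS, List.nodup_singleton _, ?_⟩
          intro y hy z hz heq
          have hzx : z = PySem.Int.mod (a * s) p := by simpa using hz
          rw [heq, hzx] at hy
          exact hxS hy
        have hitems' : (m.insert (min (PySem.Int.mod (a * s) p) (p - PySem.Int.mod (a * s) p))
              (PySem.Int.mod (a * s) p,
                if PySem.Int.mod (a * s) p ≤ PySem.Int.floordiv p 2 then "+" else "-")).items
            = (S ++ [PySem.Int.mod (a * s) p]).map (pvEnt p) := by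
          rw [PySem.Dict.items_insert_of_not_contains _ _ hcont, hitems, List.map_append]
          rfl
        have hbnd' : ∀ x0 ∈ S ++ [PySem.Int.mod (a * s) p], 1 ≤ pvJf p x0 ∧ pvJf p x0 ≤ k := by
          intro x0 hx0
          rcases List.mem_append.mp hx0 with h | h
          · exact hbnd x0 h
          · rw [List.mem_singleton.mp h, hjf]; omega
        have hinj' : ((S ++ [PySem.Int.mod (a * s) p]).map (pvJf p)).Nodup := by
          rw [List.map_append, List.nodup_append]
          refine ⟨hinj, List.nodup_singleton _, ?_⟩
          intro y hy z hz hyz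
          obtain ⟨x0, hx0, hj0⟩ := List.mem_map.mp hy
          have hz' : z = pvJf p (PySem.Int.mod (a * s) p) := by simpa using hz
          rw [hyz, hz', hjf] at hj0
          exact hnotin x0 hx0 hj0
        obtain ⟨ih1, ih2⟩ := ih (S ++ [PySem.Int.mod (a * s) p]) _ hS' hitems' hbnd' hinj'
        have hupd : S.update ((s :: rest).map (pvXf a p)) =
            (S ++ [PySem.Int.mod (a * s) p]).update (rest.map (pvXf a p)) := by
          rw [List.map_cons, PySem.Set.update_cons, hxf, PySem.Set.add_of_not_mem hxS]
        rw [heq, hupd]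
        constructor
        · rw [ih1]
          constructor
          · intro hn ⟨hall, hnd⟩
            exact hn ⟨fun t ht => hall t (List.mem_cons_of_mem s ht), hnd⟩
          · intro hn ⟨hall, hnd⟩
            refine hn ⟨?_, hnd⟩
            intro t ht
            rcases List.mem_cons.mp ht with rfl | ht'
            · rw [hxf, hjf]; omega
            · exact hall t ht'
        · exact ih2

theorem pvSignsB_eq (a : Int) (seed : List Int) (p k : Int) :
    pvSignsB a seed p k = pvAttempt a seed p k := by
  have hxs : seed.map (fun s => PySem.Int.mod (a * s) p) = seed.map (pvXf a p) := rfl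
  set image : PySem.Set Int := PySem.Set.ofList (seed.map (pvXf a p)) with himage
  have hjfun : (fun x => min x (p - x)) = pvJf p := rfl
  obtain ⟨h1, h2⟩ := pvSignsLoop_spec a p k seed PySem.Set.empty PySem.Dict.empty
    List.nodup_nil rfl (by intro x hx; simp [PySem.Set.empty] at hx)
    (by simp [PySem.Set.empty])
  rw [PySem.Set.update_empty, ← himage] at h1 h2
  -- A's validity conditions imply B's Good and vice versa
  have hGoodOfA : ((image.length : Int) = k) →
      (PySem.Set.equal (PySem.Set.ofList (image.map (pvJf p)))
        (PySem.Set.ofList (PySem.List.pyRange 1 (k + 1) 1)) = true) →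
      ((∀ s ∈ seed, 1 ≤ pvJf p (pvXf a p s) ∧ pvJf p (pvXf a p s) ≤ k) ∧
        (image.map (pvJf p)).Nodup) := by
    intro hlen heq
    have hmemt := PySem.Set.equal_iff _ _ |>.mp heq
    constructor
    · intro s hs
      have hxi : pvXf a p s ∈ image := by
        rw [himage, PySem.Set.mem_ofList]
        exact List.mem_map.mpr ⟨s, hs, rfl⟩
      have : pvJf p (pvXf a p s) ∈ PySem.Set.ofList (image.map (pvJf p)) := by
        rw [PySem.Set.mem_ofList]
        exact List.mem_map.mpr ⟨_, hxi, rfl⟩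
      have := (hmemt _).mp this
      rw [PySem.Set.mem_ofList, PySem.List.mem_pyRange_one] at this
      omega
    · have hk0 : 0 ≤ k := by
        have : (0 : Int) ≤ (image.length : Int) := by positivity
        omega
      have htnd : (PySem.Set.ofList (PySem.List.pyRange 1 (k + 1) 1)) =
          PySem.List.pyRange 1 (k + 1) 1 :=
        PySem.Set.ofList_eq_self_of_nodup _ (PySem.List.nodup_pyRange_one 1 (k + 1))
      have hperm : (PySem.Set.ofList (image.map (pvJf p))).Perm
          (PySem.Set.ofList (PySem.List.pyRange 1 (k + 1) 1)) :=
        (List.perm_ext_iff_of_nodup (PySem.Set.nodup_ofList _) (PySem.Set.nodup_ofList _)).mpr hmemt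
      have hlens : (PySem.Set.ofList (image.map (pvJf p))).length = (image.map (pvJf p)).length := by
        have h3 := hperm.length_eq
        rw [htnd, PySem.List.length_pyRange_one] at h3
        rw [h3, List.length_map]
        omega
      exact pvNodup_of_ofList_length _ hlens
  have hAOfGood : ((image.length : Int) = k) →
      ((∀ s ∈ seed, 1 ≤ pvJf p (pvXf a p s) ∧ pvJf p (pvXf a p s) ≤ k) ∧
        (image.map (pvJf p)).Nodup) →
      (PySem.Set.equal (PySem.Set.ofList (image.map (pvJf p)))
        (PySem.Set.ofList (PySem.List.pyRange 1 (k + 1) 1)) = true) := by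
    intro hlen ⟨hbnd, hnd⟩
    have habs : PySem.Set.ofList (image.map (pvJf p)) = image.map (pvJf p) :=
      PySem.Set.ofList_eq_self_of_nodup _ hnd
    have htnd : (PySem.Set.ofList (PySem.List.pyRange 1 (k + 1) 1)) =
        PySem.List.pyRange 1 (k + 1) 1 :=
      PySem.Set.ofList_eq_self_of_nodup _ (PySem.List.nodup_pyRange_one 1 (k + 1))
    have hsub : (image.map (pvJf p)) ⊆ PySem.List.pyRange 1 (k + 1) 1 := by
      intro y hy
      obtain ⟨x, hx, hjx⟩ := List.mem_map.mp hy
      rw [himage, PySem.Set.mem_ofList] at hx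
      obtain ⟨s, hs, hxs'⟩ := List.mem_map.mp hx
      have := hbnd s hs
      rw [hxs'] at this
      rw [PySem.List.mem_pyRange_one]
      omega
    have hperm : (image.map (pvJf p)).Perm (PySem.List.pyRange 1 (k + 1) 1) := by
      refine (hnd.subperm hsub).perm_of_length_le ?_
      rw [PySem.List.length_pyRange_one, List.length_map]
      omega
    rw [PySem.Set.equal_iff, habs, htnd]
    intro x
    exact hperm.mem_iff
  -- now compare the two programs
  cases hloop : pvSignsLoop a p k seed PySem.Dict.empty with
  | none =>
    have hGoodFalse := h1.mp hloop
    have hB : pvSignsB a seed p k = none := by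
      unfold pvSignsB
      simp only [hloop]
    rw [hB]
    simp only [pvAttempt]
    rw [hxs, ← himage]
    split_ifs with hl he
    · rfl
    · exfalso
      refine hGoodFalse (hGoodOfA ?_ ?_)
      · simpa [PySem.Set.len] using hl
      · rw [← hjfun] at *; exact he
    · rfl
  | some m =>
    have hGood : (∀ s ∈ seed, 1 ≤ pvJf p (pvXf a p s) ∧ pvJf p (pvXf a p s) ≤ k) ∧
        (image.map (pvJf p)).Nodup := by
      by_contra hg
      rw [← h1] at hg
      rw [hloop] at hg
      exact absurd hg (by simp)
    have hm := h2 m hloop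
    have hsize : m.size = image.length := by
      show m.items.length = _
      rw [hm, List.length_map]
    by_cases hk : (image.length : Int) = k
    · -- both succeed with the same signs list
      have hB : pvSignsB a seed p k =
          some ((m.items.foldl (fun d pr => d.insert pr.1 pr.2.2)
            (PySem.Dict.empty : PySem.Dict Int String)).items) := by
        unfold pvSignsB
        simp only [hloop]
        rw [if_neg (by rw [hsize]; omega)]
      have hBitems : (m.items.foldl (fun d pr => d.insert pr.1 pr.2.2)
          (PySem.Dict.empty : PySem.Dict Int String)).items =
          image.map (fun x => (min x (p - x), if x ≤ PySem.Int.floordiv p 2 then "+" else "-")) := by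
        rw [PySem.Dict.items_foldl_insert_fresh m.items Prod.fst (fun pr => pr.2.2) _
          (by intro pr _; rfl) (by rw [hm, List.map_map]; exact hGood.2)]
        rw [hm, List.map_map]
        rfl
      have hA : pvAttempt a seed p k =
          some ((image.foldl (fun d x => d.insert (min x (p - x))
            (if x ≤ PySem.Int.floordiv p 2 then "+" else "-"))
            (PySem.Dict.empty : PySem.Dict Int String)).items) := by
        simp only [pvAttempt]
        rw [hxs, ← himage]
        rw [if_neg (by simp [PySem.Set.len]; omega)]
        rw [if_pos (by rw [hjfun]; exact hAOfGood hk hGood)]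
      have hAitems : (image.foldl (fun d x => d.insert (min x (p - x))
          (if x ≤ PySem.Int.floordiv p 2 then "+" else "-"))
          (PySem.Dict.empty : PySem.Dict Int String)).items =
          image.map (fun x => (min x (p - x), if x ≤ PySem.Int.floordiv p 2 then "+" else "-")) := by
        rw [PySem.Dict.items_foldl_insert_fresh image (fun x => min x (p - x))
          (fun x => if x ≤ PySem.Int.floordiv p 2 then "+" else "-") _
          (by intro x _; rfl) hGood.2]
        rfl
      rw [hB, hBitems, hA, hAitems]
    · -- both fail the length test
      have hB : pvSignsB a seed p k = none := by
        unfold pvSignsB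
        simp only [hloop]
        rw [if_pos (by rw [hsize]; omega)]
      rw [hB]
      simp only [pvAttempt]
      rw [hxs, ← himage]
      rw [if_pos (by simp [PySem.Set.len]; omega)]


theorem pvScanB_eq (seed : List Int) (p k : Int) (l : List Int) :
    pvScanB seed p k l = pvScan seed p k l := by
  induction l with
  | nil => rfl
  | cons a rest ih =>
    rw [pvScanB, pvScan, pvSignsB_eq]
    cases pvAttempt a seed p k <;> simp [ih]


theorem pvScan_eq_filter (seed : List Int) (p k : Int) (l : List Int) :
    pvScan seed p k l =
      match l.filter (fun a => (pvAttempt a seed p k).isSome) with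
      | [] => (false, none, [])
      | a :: _ => (true, some a, (pvAttempt a seed p k).getD []) := by
  induction l with
  | nil => rfl
  | cons a rest ih =>
    rw [pvScan]
    cases h : pvAttempt a seed p k with
    | some sg => simp [h]
    | none => simp [h, ih]

theorem pvScan_congr (seed : List Int) (p k : Int) (l1 l2 : List Int)
    (h : l1.filter (fun a => (pvAttempt a seed p k).isSome) =
         l2.filter (fun a => (pvAttempt a seed p k).isSome)) :
    pvScan seed p k l1 = pvScan seed p k l2 := by
  rw [pvScan_eq_filter, pvScan_eq_filter, h]

-- extraction: a successful check puts the absolute residue of a*seed[0] into {1..k}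
theorem pvAttempt_some_mem (a s0 : Int) (tl : List Int) (p k : Int)
    (h : (pvAttempt a (s0 :: tl) p k).isSome = true) :
    1 ≤ min (PySem.Int.mod (a * s0) p) (p - PySem.Int.mod (a * s0) p) ∧
    min (PySem.Int.mod (a * s0) p) (p - PySem.Int.mod (a * s0) p) ≤ k := by
  unfold pvAttempt at h
  simp only [Option.isSome] at h
  split_ifs at h with h1 h2
  · set x := PySem.Int.mod (a * s0) p with hx
    have hmem : x ∈ PySem.Set.ofList ((s0 :: tl).map (fun s => PySem.Int.mod (a * s) p)) := by
      rw [PySem.Set.mem_ofList]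
      exact List.mem_map.mpr ⟨s0, List.mem_cons_self, rfl⟩
    have hj : min x (p - x) ∈ PySem.Set.ofList
        ((PySem.Set.ofList ((s0 :: tl).map (fun s => PySem.Int.mod (a * s) p))).map
          (fun x => min x (p - x))) := by
      rw [PySem.Set.mem_ofList]
      exact List.mem_map.mpr ⟨x, hmem, rfl⟩
    have := ((PySem.Set.equal_iff _ _).mp h2 (min x (p - x))).mp hj
    rw [PySem.Set.mem_ofList, PySem.List.mem_pyRange_one] at this
    omega

-- the Euclidean loop really computes a positive common divisor with a Bezout certificate mod p
theorem pvBezout_spec (r p : Int) : ∀ n (rr oldr olds s : Int), rr.natAbs = n → 0 < oldr → 0 ≤ rr →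
    p ∣ olds * r - oldr → p ∣ s * r - rr →
    0 < (pvBezout oldr rr olds s).1 ∧ (pvBezout oldr rr olds s).1 ∣ oldr ∧
    (pvBezout oldr rr olds s).1 ∣ rr ∧ p ∣ (pvBezout oldr rr olds s).2 * r - (pvBezout oldr rr olds s).1 := by
  intro n
  induction n using Nat.strong_induction_on with
  | _ n ih =>
    intro rr oldr olds s hn hor hrr h1 h2
    by_cases hz : rr = 0
    · rw [pvBezout, if_pos hz]
      subst hz
      exact ⟨hor, dvd_refl _, dvd_zero _, h1⟩
    · rw [pvBezout, if_neg hz]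
      have hrpos : 0 < rr := lt_of_le_of_ne hrr (Ne.symm hz)
      have hstep := pvBezout_step oldr rr
      have hrem0 : 0 ≤ oldr - PySem.Int.floordiv oldr rr * rr := by
        rw [hstep]; exact PySem.Int.mod_nonneg oldr hrpos
      have hlt : (oldr - PySem.Int.floordiv oldr rr * rr).natAbs < n := by
        rw [hstep, ← hn]; exact pvMod_natAbs_lt oldr rr hz
      have h2' : p ∣ (olds - PySem.Int.floordiv oldr rr * s) * r -
          (oldr - PySem.Int.floordiv oldr rr * rr) := by
        have : (olds - PySem.Int.floordiv oldr rr * s) * r -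
            (oldr - PySem.Int.floordiv oldr rr * rr) =
            (olds * r - oldr) - PySem.Int.floordiv oldr rr * (s * r - rr) := by ring
        rw [this]
        exact dvd_sub h1 (Dvd.dvd.mul_left h2 _)
      obtain ⟨hg, hd1, hd2, hb⟩ := ih _ hlt _ _ _ _ rfl hrpos hrem0 h2 h2'
      refine ⟨hg, ?_, hd1, hb⟩
      have hsum := dvd_add hd2 (Dvd.dvd.mul_left hd1 (PySem.Int.floordiv oldr rr))
      simpa using hsum

theorem pvMem_tStep (g u pp t : Int) (c : PySem.Set Int) (y : Int) :
    (y ∈ (if PySem.Int.mod t g = 0 then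
            let base := PySem.Int.mod (PySem.Int.floordiv t g * u) pp
            (PySem.List.pyRange 0 g 1).foldl (fun c m => PySem.Set.add c (base + m * pp)) c
          else c))
    ↔ y ∈ c ∨ (PySem.Int.mod t g = 0 ∧ ∃ m ∈ PySem.List.pyRange 0 g 1,
        y = PySem.Int.mod (PySem.Int.floordiv t g * u) pp + m * pp) := by
  split_ifs with ht
  · simp only [PySem.Set.mem_foldl_add, ht, true_and]
  · simp [ht]

-- membership in B's candidate set, unfolded to its arithmetic witnesses
theorem pvMem_candsFold (p g u pp : Int) (J : List Int) (c0 : PySem.Set Int) (y : Int) :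
    (y ∈ J.foldl
        (fun c j =>
          [j, p - j].foldl
            (fun c t =>
              if PySem.Int.mod t g = 0 then
                let base := PySem.Int.mod (PySem.Int.floordiv t g * u) pp
                (PySem.List.pyRange 0 g 1).foldl
                  (fun c m => PySem.Set.add c (base + m * pp)) c
              else c) c) c0)
    ↔ y ∈ c0 ∨ ∃ j ∈ J, ∃ t ∈ [j, p - j], PySem.Int.mod t g = 0 ∧
        ∃ m ∈ PySem.List.pyRange 0 g 1,
          y = PySem.Int.mod (PySem.Int.floordiv t g * u) pp + m * pp := by
  induction J generalizing c0 with
  | nil => simp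
  | cons j J ih =>
    rw [List.foldl_cons, ih]
    simp only [List.foldl_cons, List.foldl_nil]
    rw [pvMem_tStep, pvMem_tStep]
    simp only [List.mem_cons, List.not_mem_nil]
    constructor
    · rintro (((hc | hq) | hq) | ⟨j', hj', ht⟩)
      · exact Or.inl hc
      · exact Or.inr ⟨j, Or.inl rfl, j, Or.inl rfl, hq.1, hq.2⟩
      · exact Or.inr ⟨j, Or.inl rfl, p - j, Or.inr (Or.inl rfl), hq.1, hq.2⟩
      · exact Or.inr ⟨j', Or.inr hj', ht⟩
    · rintro (hc | ⟨j', hj'', t, htm, hq⟩)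
      · exact Or.inl (Or.inl (Or.inl hc))
      · rcases hj'' with rfl | hj'
        · rcases htm with rfl | rfl | h
          · exact Or.inl (Or.inl (Or.inr hq))
          · exact Or.inl (Or.inr hq)
          · exact absurd h (by simp)
        · exact Or.inr ⟨j', hj', t, htm, hq⟩

theorem pvNodup_candsFold (p g u pp : Int) (J : List Int) (c0 : PySem.Set Int) (h : c0.Nodup) :
    (J.foldl
        (fun c j =>
          [j, p - j].foldl
            (fun c t =>
              if PySem.Int.mod t g = 0 then
                let base := PySem.Int.mod (PySem.Int.floordiv t g * u) pp
                (PySem.List.pyRange 0 g 1).foldl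
                  (fun c m => PySem.Set.add c (base + m * pp)) c
              else c) c) c0).Nodup := by
  have hstep : ∀ (c : PySem.Set Int) (t : Int), c.Nodup →
      (if PySem.Int.mod t g = 0 then
          let base := PySem.Int.mod (PySem.Int.floordiv t g * u) pp
          (PySem.List.pyRange 0 g 1).foldl (fun c m => PySem.Set.add c (base + m * pp)) c
        else c).Nodup := by
    intro c t hc
    split_ifs with ht
    · rw [← PySem.Set.update_map_eq_foldl_add]
      exact PySem.Set.nodup_update _ _ hc
    · exact hc
  induction J generalizing c0 with
  | nil => exact h
  | cons j J ih =>
    rw [List.foldl_cons]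
    exact ih _ (hstep _ _ (hstep _ _ h))

-- the modular heart: every valid multiplier a is among B's candidates
theorem pvCands_complete (p r g sB k a x : Int) (hp : 2 ≤ p) (hg : 0 < g)
    (hgr : g ∣ r) (hgp : g ∣ p) (hbez : p ∣ sB * r - g)
    (har : p ∣ a * r - x)
    (ha1 : 1 ≤ a) (hap : a < p) (hj1 : 1 ≤ min x (p - x)) (hjk : min x (p - x) ≤ k) :
    ∃ j ∈ PySem.List.pyRange 1 (min k (p / 2) + 1) 1, ∃ t ∈ [j, p - j],
      t % g = 0 ∧ ∃ m ∈ PySem.List.pyRange 0 g 1,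
        a = (t / g * (sB % (p / g))) % (p / g) + m * (p / g) := by
  set pp := p / g with hpp
  set r' := r / g with hr'
  have hppg : pp * g = p := Int.ediv_mul_cancel hgp
  have hr'g : r' * g = r := Int.ediv_mul_cancel hgr
  have hpp0 : 0 < pp := by nlinarith
  have hgx : g ∣ x := by
    obtain ⟨c, hc⟩ := har
    obtain ⟨r2, hr2⟩ := hgr
    obtain ⟨p2, hp2⟩ := hgp
    refine ⟨a * r2 - p2 * c, ?_⟩
    rw [hr2] at hc
    linear_combination (-1 : Int) * hc - c * hp2
  set x' := x / g with hx'
  have hx'g : x' * g = x := Int.ediv_mul_cancel hgx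
  have hbez' : pp ∣ sB * r' - 1 := by
    obtain ⟨c, hc⟩ := hbez
    refine ⟨c, ?_⟩
    have hgne : g ≠ 0 := by omega
    apply mul_left_cancel₀ hgne
    have : g * (sB * r' - 1) = sB * r - g := by rw [← hr'g]; ring
    rw [this, hc, ← hppg]; ring
  have har' : pp ∣ a * r' - x' := by
    obtain ⟨c, hc⟩ := har
    refine ⟨c, ?_⟩
    have hgne : g ≠ 0 := by omega
    apply mul_left_cancel₀ hgne
    have : g * (a * r' - x') = a * r - x := by rw [← hr'g, ← hx'g]; ring
    rw [this, hc, ← hppg]; ring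
  set u := sB % pp with hu
  have hsu : pp ∣ sB - u := ⟨sB / pp, by rw [hu, Int.emod_def]; ring⟩
  have hau : pp ∣ a - x' * u := by
    have h1 : pp ∣ a - x' * sB := by
      have : a - x' * sB = -(a * (sB * r' - 1)) + sB * (a * r' - x') := by ring
      rw [this]
      exact dvd_add (dvd_neg.mpr (Dvd.dvd.mul_left hbez' a)) (Dvd.dvd.mul_left har' sB)
    have h2 : pp ∣ x' * (sB - u) := Dvd.dvd.mul_left hsu x'
    have : a - x' * u = (a - x' * sB) + x' * (sB - u) := by ring
    rw [this]
    exact dvd_add h1 h2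
  have hbase : a % pp = (x' * u) % pp := Int.ModEq.symm (Int.modEq_iff_dvd.mpr (by simpa using hau))
  set m := a / pp with hm
  have ham : a = (x' * u) % pp + m * pp := by
    rw [← hbase, Int.emod_def]; ring
  have hm0 : 0 ≤ m := Int.ediv_nonneg (by omega) (by omega)
  have hmlt : m < g := by
    have hb0 : 0 ≤ (x' * u) % pp := Int.emod_nonneg _ (by omega)
    nlinarith
  refine ⟨min x (p - x), ?_, x, ?_, ?_, m, ?_, ?_⟩
  · rw [PySem.List.mem_pyRange_one]
    omega
  · rcases le_total x (p - x) with h | h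
    · simp [min_eq_left h]
    · simp [min_eq_right h]
  · exact Int.emod_eq_zero_of_dvd hgx
  · rw [PySem.List.mem_pyRange_one]; omega
  · rw [ham]

-- every candidate lies in [0, p)
theorem pvCands_sound (p g w m a : Int) (hp : 2 ≤ p) (hg : 0 < g) (hgp : g ∣ p)
    (hm0 : 0 ≤ m) (hmg : m < g) (ha : a = w % (p / g) + m * (p / g)) :
    0 ≤ a ∧ a < p := by
  have hppg : p / g * g = p := Int.ediv_mul_cancel hgp
  have hpp0 : 0 < p / g := by nlinarith
  have h1 : 0 ≤ w % (p / g) := Int.emod_nonneg w (by omega)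
  have h2 : w % (p / g) < p / g := Int.emod_lt_of_pos w hpp0
  constructor
  · nlinarith
  · nlinarith

theorem pvFilter_eq_of_sorted_mem (f : Int → Bool) (l1 l2 : List Int)
    (h1 : l1.Pairwise (· < ·)) (h2 : l2.Pairwise (· < ·))
    (hm : ∀ x, f x = true → (x ∈ l1 ↔ x ∈ l2)) : l1.filter f = l2.filter f := by
  have nd1 : (l1.filter f).Nodup := ((h1.imp (fun h => ne_of_lt h))).filter f
  have nd2 : (l2.filter f).Nodup := ((h2.imp (fun h => ne_of_lt h))).filter f
  have hmem : ∀ x, x ∈ l1.filter f ↔ x ∈ l2.filter f := by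
    intro x
    simp only [List.mem_filter]
    constructor
    · rintro ⟨hx, hf⟩; exact ⟨(hm x hf).mp hx, hf⟩
    · rintro ⟨hx, hf⟩; exact ⟨(hm x hf).mpr hx, hf⟩
  have hperm : (l1.filter f).Perm (l2.filter f) := (List.perm_ext_iff_of_nodup nd1 nd2).mpr hmem
  exact List.Perm.eq_of_pairwise (fun a b _ _ hab hba => le_antisymm hab hba)
    ((List.Pairwise.filter f h1).imp le_of_lt)
    ((List.Pairwise.filter f h2).imp le_of_lt) hperm

-- ===== VERDICT (by name: the statement is the Claim_ definition above) =====
theorem check_seed_spec : Claim_equal_check_seed := by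
  intro seed p k _
  unfold Spec_check_seed
  by_cases hp : p ≤ 1
  · rw [check_seed, PySem.List.pyRange_one_eq_nil (by omega)]
    simp only [check_seed_alt, if_pos hp]
    rfl
  · have hp2 : (2 : Int) ≤ p := by omega
    match seed with
    | [] =>
      rw [check_seed]
      simp only [check_seed_alt, if_neg (by omega : ¬ p ≤ 1)]
      by_cases hk : k = 0
      · subst hk
        rw [PySem.List.pyRange_one_cons (by omega : (1:Int) < p)]
        rw [pvScan]
        have hatt : pvAttempt 1 [] p 0 = some [] := rfl
        rw [hatt]
        simp
      · have hnone : ∀ a, pvAttempt a [] p k = none := by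
          intro a
          unfold pvAttempt
          rw [if_pos]
          simpa using (Ne.symm hk)
        rw [pvScan_eq_filter, List.filter_eq_nil_iff.mpr (by intro a _; simp [hnone a])]
        simp [hk]
    | s0 :: tl =>
      rw [check_seed]
      simp only [check_seed_alt, if_neg (by omega : ¬ p ≤ 1)]
      set rr := PySem.Int.mod s0 p with hrr
      have hrr' : rr = s0 % p := PySem.Int.mod_eq_emod_of_pos (by omega)
      by_cases hr : rr = 0
      · have hnone : ∀ a, ¬ ((pvAttempt a (s0 :: tl) p k).isSome = true) := by
          intro a hf
          obtain ⟨h1, h2⟩ := pvAttempt_some_mem a s0 tl p k hf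
          have hds0 : p ∣ s0 := (PySem.Int.mod_eq_zero_iff_dvd s0 p).mp hr
          have hz : PySem.Int.mod (a * s0) p = 0 :=
            (PySem.Int.mod_eq_zero_iff_dvd _ p).mpr (Dvd.dvd.mul_left hds0 a)
          rw [hz] at h1 h2
          omega
        rw [if_neg (by simpa using hr)]
        rw [pvScan_eq_filter, List.filter_eq_nil_iff.mpr (fun a _ => hnone a)]
        rfl
      · rw [if_pos hr]
        have hr0 : 0 < rr := lt_of_le_of_ne (PySem.Int.mod_nonneg s0 (by omega)) (Ne.symm hr)
        have hrp : rr < p := PySem.Int.mod_lt s0 (by omega)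
        obtain ⟨hg0, hgr, hgp, hbez⟩ :=
          pvBezout_spec rr p p.natAbs p rr 1 0 rfl hr0 (by omega) ⟨0, by ring⟩ ⟨-1, by ring⟩
        set g := (pvBezout rr p 1 0).1 with hgdef
        set sB := (pvBezout rr p 1 0).2 with hsdef
        have hp0 : (0 : Int) < p := by omega
        have hfd : PySem.Int.floordiv p g = p / g := PySem.Int.floordiv_eq_ediv_of_pos hg0
        have hppg : p / g * g = p := Int.ediv_mul_cancel hgp
        have hpp0 : (0 : Int) < p / g := by nlinarith
        rw [pvScanB_eq]
        apply pvScan_congr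
        apply pvFilter_eq_of_sorted_mem
        · exact PySem.List.pairwise_lt_pyRange_one 1 p
        · exact ((PySem.List.sorted_pairwise _ _).and
            (((PySem.List.sorted_perm _ _ _).symm).nodup
              (pvNodup_candsFold p g _ _ _ _ List.nodup_nil))).imp
            (fun h => lt_of_le_of_ne h.1 h.2)
        · intro x hf
          obtain ⟨h1, h2⟩ := pvAttempt_some_mem x s0 tl p k hf
          rw [PySem.List.mem_pyRange_one, PySem.List.mem_sorted, pvMem_candsFold]
          rw [PySem.Int.mod_eq_emod_of_pos hp0] at h1 h2
          simp only [PySem.Int.mod_eq_emod_of_pos hg0, PySem.Int.mod_eq_emod_of_pos hpp0,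
            PySem.Int.floordiv_eq_ediv_of_pos hg0,
            PySem.Int.floordiv_eq_ediv_of_pos (show (0:Int) < 2 by norm_num)]
          have hempty : ∀ y : Int, y ∈ (PySem.Set.empty : PySem.Set Int) ↔ False := by
            intro y; simp [PySem.Set.empty]
          rw [hempty, false_or]
          constructor
          · rintro ⟨hx1, hxp⟩
            have hd1 : p ∣ x * s0 - (x * s0) % p := ⟨(x * s0) / p, by rw [Int.emod_def]; ring⟩
            have hd2 : p ∣ s0 - rr := ⟨s0 / p, by rw [hrr', Int.emod_def]; ring⟩
            have har : p ∣ x * rr - (x * s0) % p := by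
              have : x * rr - (x * s0) % p = (x * s0 - (x * s0) % p) - x * (s0 - rr) := by ring
              rw [this]
              exact dvd_sub hd1 (Dvd.dvd.mul_left hd2 x)
            exact pvCands_complete p rr g sB k x ((x * s0) % p) hp2 hg0 hgr hgp hbez har hx1 hxp h1 h2
          · rintro ⟨j, hj, t, ht, htg, m, hm, hxeq⟩
            rw [PySem.List.mem_pyRange_one] at hm
            obtain ⟨hx0, hxp⟩ := pvCands_sound p g (t / g * (sB % (p / g))) m x hp2 hg0 hgp hm.1 hm.2 hxeq
            have hx1 : 1 ≤ x := by
              by_contra hlt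
              have hx0' : x = 0 := by omega
              have hzz : (0 * s0) % p = 0 := by simp
              rw [hx0', hzz] at h1
              omega
            exact ⟨hx1, hxp⟩
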